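-- pv_equiv track=rewrite | github.com/Kimhansav/Programmers-coding-test | 옹알이(2).py | solution
-- ===== SOURCE A (Python) =====
-- def solution(babbling):
--     answer = 0
--     candid = ['aya', 'ye', 'woo', 'ma']
--     for i in babbling:
--         sep_list = []
--         query = ''
--         last_add = ''
--         for char in i:
--             query += char
--             if query != last_add and query in candid:
--
--                 sep_list.append(query)
--                 last_add = query
--                 query = ''
--
--         if ''.join(sep_list) == i:
--             answer += 1
--     return answer
-- ===== SOURCE B (Python) =====
-- def solution(babbling):
--     CAND = ('aya', 'ye', 'woo', 'ma')
--
--     def ok(rest, prev):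
--         if not rest:
--             return True
--         for t in CAND:
--             if t != prev and rest.startswith(t):
--                 return ok(rest[len(t):], t)
--         return False
--
--     return sum(1 for w in babbling if ok(w, ''))
-- ===== Notes on version B (the rewrite author's own statement) =====
-- stated objective: simpler
-- what changed: A builds each word's token list char-by-char with a pending-query accumulator and re-joins it for comparison; B instead scans by whole tokens, matching a prefix from the prefix-free syllable set at each position (skipping the previous token) and jumping ahead, with no list building or joining.
import Mathlib
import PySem

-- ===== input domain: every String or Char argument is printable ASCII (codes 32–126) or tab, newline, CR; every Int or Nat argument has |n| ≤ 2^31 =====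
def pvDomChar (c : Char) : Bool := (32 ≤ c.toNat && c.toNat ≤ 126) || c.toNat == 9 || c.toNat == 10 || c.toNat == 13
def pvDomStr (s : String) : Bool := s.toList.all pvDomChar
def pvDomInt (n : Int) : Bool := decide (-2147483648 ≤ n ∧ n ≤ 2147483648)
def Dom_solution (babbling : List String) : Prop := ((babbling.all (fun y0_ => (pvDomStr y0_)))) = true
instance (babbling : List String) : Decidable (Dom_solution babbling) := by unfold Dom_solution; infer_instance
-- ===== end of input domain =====

-- B replaces A's char-by-char accumulator (build query, append to sep_list, re-join and
-- compare) with a direct token scan: at each position try the (prefix-free) syllables and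
-- jump ahead by a whole token; objective: simpler, no list building / joining.
-- Strings are handled as their char lists (exact: ''.join(sep)==i ↔ flatten of char lists = i.toList).

-- ===== PORT A =====
-- candid = ['aya', 'ye', 'woo', 'ma']  (as char lists)
def candA : List (List Char) :=
  [['a','y','a'], ['y','e'], ['w','o','o'], ['m','a']]

-- one iteration of A's inner `for char in i` loop; state = (sep_list, query, last_add)
def stepA (s : List (List Char) × List Char × List Char) (char : Char) :
    List (List Char) × List Char × List Char :=
  let query := s.2.1 ++ [char]
  if query ≠ s.2.2 ∧ query ∈ candA then (s.1 ++ [query], [], query)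
  else (s.1, query, s.2.2)

-- A's body for one word i: run the inner loop, then test ''.join(sep_list) == i
def wordA (i : String) : Bool :=
  let st := i.toList.foldl stepA ([], [], [])
  decide (st.1.flatten = i.toList)

def solution (babbling : List String) : Int :=
  babbling.foldl (fun answer i => if wordA i then answer + 1 else answer) 0

-- ===== PORT B =====
-- B's recursive `ok(rest, prev)`: find the first candidate ≠ prev that is a prefix, jump past it
def okB (cs : List Char) (prev : List Char) : Bool :=
  if cs = [] then true
  else
    match hf : candA.find? (fun t => decide (t ≠ prev) && t.isPrefixOf cs) with
    | some t => okB (cs.drop t.length) t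
    | none => false
termination_by cs.length
decreasing_by
  have hmem := List.mem_of_find?_eq_some hf
  have ht := List.find?_some hf
  simp only [Bool.and_eq_true, List.isPrefixOf_iff_prefix, decide_eq_true_eq] at ht
  have h1 : 1 ≤ t.length := by
    simp only [candA, List.mem_cons, List.not_mem_nil, or_false] at hmem
    rcases hmem with rfl | rfl | rfl | rfl <;> simp
  have h2 : cs ≠ [] := by assumption
  have h3 : 1 ≤ cs.length := by
    cases cs with
    | nil => exact absurd rfl h2
    | cons a l => simp
  simp only [List.length_drop]
  omega

def solution_alt (babbling : List String) : Int :=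
  babbling.foldl (fun a w => if okB w.toList [] then a + 1 else a) 0

-- ===== PRECONDITION & SPEC =====
def Spec_solution (babbling : List String) (out : Int) : Prop := out = solution_alt babbling
instance (babbling : List String) (out : Int) : Decidable (Spec_solution babbling out) := by unfold Spec_solution; infer_instance

-- ===== CLAIM (what is proved, stated in full; the proofs are below) =====
def Claim_equal_solution : Prop := ∀ (babbling : List String), Dom_solution babbling → Spec_solution babbling (solution babbling)

-- ===== LEMMAS AND PROOFS =====

-- the (query, last_add) components of A's inner loop, tracked alone
def stepQ (s : List Char × List Char) (c : Char) : List Char × List Char :=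
  let q := s.1 ++ [c]
  if q ≠ s.2 ∧ q ∈ candA then ([], q) else (q, s.2)

def qlA (cs : List Char) (q l : List Char) : List Char × List Char :=
  cs.foldl stepQ (q, l)

theorem snd_foldl_stepA (cs : List Char) :
    ∀ sep q l, (cs.foldl stepA (sep, q, l)).2 = qlA cs q l := by
  induction cs with
  | nil => intro sep q l; rfl
  | cons c cs ih =>
    intro sep q l
    simp only [List.foldl_cons, stepA, stepQ, qlA] at *
    split_ifs with h
    · exact ih _ _ _
    · exact ih _ _ _

-- loop invariant: flatten(sep_list) ++ query = sep₀ ++ q₀ ++ consumed chars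
theorem inv_foldl_stepA (cs : List Char) :
    ∀ sep q l, (cs.foldl stepA (sep, q, l)).1.flatten ++ (cs.foldl stepA (sep, q, l)).2.1
      = sep.flatten ++ q ++ cs := by
  induction cs with
  | nil => intro sep q l; simp
  | cons c cs ih =>
    intro sep q l
    simp only [List.foldl_cons, stepA]
    split_ifs with h
    · have := ih (sep ++ [q ++ [c]]) [] (q ++ [c])
      simp only [List.flatten_append, List.flatten_cons, List.flatten_nil,
        List.append_nil] at this
      simpa [List.append_assoc] using this
    · have := ih sep (q ++ [c]) l
      simpa [List.append_assoc] using this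

-- candA is prefix-free
theorem candA_prefix_free :
    ∀ t₁ ∈ candA, ∀ t₂ ∈ candA, t₁ <+: t₂ → t₁ = t₂ := by decide

theorem candA_ne_nil : ∀ t ∈ candA, 1 ≤ t.length := by decide

-- characterisation of "A's pending query ends empty"
theorem qlA_empty_iff (cs : List Char) :
    ∀ q l, (qlA cs q l).1 = [] ↔
      (q = [] ∧ cs = []) ∨
      ∃ k, 1 ≤ k ∧ k ≤ cs.length ∧ (q ++ cs.take k) ∈ candA ∧ q ++ cs.take k ≠ l ∧
        (qlA (cs.drop k) [] (q ++ cs.take k)).1 = [] := by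
  induction cs with
  | nil =>
    intro q l
    simp only [qlA, List.foldl_nil, List.length_nil]
    constructor
    · intro h; exact Or.inl ⟨h, by simp⟩
    · rintro (⟨h, -⟩ | ⟨k, hk1, hk2, -⟩); · exact h
      omega
  | cons c cs ih =>
    intro q l
    simp only [qlA, List.foldl_cons, stepQ]
    split_ifs with h
    · -- match taken: query resets, t = q ++ [c] appended
      constructor
      · intro hrest
        refine Or.inr ⟨1, le_refl 1, by simp, ?_, ?_, ?_⟩
        · simpa using h.2
        · simpa using h.1
        · simpa [qlA] using hrest
      · rintro (⟨-, hc⟩ | ⟨k, hk1, hk2, hmem, hne, hcont⟩); · exact absurd hc (by simp)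
        rcases Nat.lt_or_ge k 2 with hk | hk
        · have hk1' : k = 1 := by omega
          subst hk1'
          simpa [qlA] using hcont
        · -- k ≥ 2 impossible: q++[c] would be a proper prefix of another candidate
          exfalso
          have htk : q ++ (c :: cs).take k = (q ++ [c]) ++ cs.take (k - 1) := by
            cases k with
            | zero => omega
            | succ k' => simp [List.take_succ_cons, List.append_assoc]
          have hpre : (q ++ [c]) <+: (q ++ (c :: cs).take k) := by
            rw [htk]; exact ⟨cs.take (k - 1), rfl⟩
          have heq := candA_prefix_free _ h.2 _ hmem hpre
          have hlen : (q ++ [c]).length = (q ++ (c :: cs).take k).length := by rw [heq]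
          rw [htk] at hlen
          simp only [List.length_append, List.length_cons, List.length_take] at hlen
          simp only [List.length_cons] at hk2
          omega
    · -- no match: query grows to q ++ [c]
      rw [show (cs.foldl stepQ (q ++ [c], l)) = qlA cs (q ++ [c]) l from rfl, ih]
      constructor
      · rintro (⟨hc, -⟩ | ⟨k, hk1, hk2, hmem, hne, hcont⟩); · exact absurd hc (by simp)
        refine Or.inr ⟨k + 1, by omega, by simp only [List.length_cons]; omega, ?_, ?_, ?_⟩
        · simpa [List.take_succ_cons, List.append_assoc] using hmem
        · simpa [List.take_succ_cons, List.append_assoc] using hne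
        · simpa [List.take_succ_cons, List.drop_succ_cons, List.append_assoc] using hcont
      · rintro (⟨-, hc⟩ | ⟨k, hk1, hk2, hmem, hne, hcont⟩); · exact absurd hc (by simp)
        rcases Nat.lt_or_ge k 2 with hk | hk
        · have hk1' : k = 1 := by omega
          subst hk1'
          exfalso
          simp only [List.take_succ_cons, List.take_zero] at hmem hne
          exact h ⟨hne, hmem⟩
        · refine Or.inr ⟨k - 1, by omega, ?_, ?_, ?_, ?_⟩
          · simp only [List.length_cons] at hk2; omega
          · have : (c :: cs).take k = c :: cs.take (k - 1) := by
              cases k with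
              | zero => omega
              | succ k' => simp [List.take_succ_cons]
            rw [this] at hmem; simpa [List.append_assoc] using hmem
          · have : (c :: cs).take k = c :: cs.take (k - 1) := by
              cases k with
              | zero => omega
              | succ k' => simp [List.take_succ_cons]
            rw [this] at hne; simpa [List.append_assoc] using hne
          · have ht : (c :: cs).take k = c :: cs.take (k - 1) := by
              cases k with
              | zero => omega
              | succ k' => simp [List.take_succ_cons]
            have hd : (c :: cs).drop k = cs.drop (k - 1) := by
              cases k with
              | zero => omega
              | succ k' => simp [List.drop_succ_cons]
            rw [ht, hd] at hcont; simpa [List.append_assoc] using hcont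

-- characterisation of okB
theorem okB_iff (cs prev : List Char) :
    okB cs prev = true ↔
      cs = [] ∨ ∃ t ∈ candA, t ≠ prev ∧ t <+: cs ∧ okB (cs.drop t.length) t = true := by
  rw [okB]
  split_ifs with hnil
  · simp [hnil]
  · simp only [hnil, false_or]
    constructor
    · intro hok
      split at hok
      · rename_i t hfind
        have hmem := List.mem_of_find?_eq_some hfind
        have hpred := List.find?_some hfind
        simp only [Bool.and_eq_true, decide_eq_true_eq, List.isPrefixOf_iff_prefix] at hpred
        exact ⟨t, hmem, hpred.1, hpred.2, hok⟩
      · exact absurd hok (by simp)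
    · rintro ⟨t, hmem, hne, hpre, hok⟩
      split
      · rename_i t' hfind
        have hmem' := List.mem_of_find?_eq_some hfind
        have hpred' := List.find?_some hfind
        simp only [Bool.and_eq_true, decide_eq_true_eq, List.isPrefixOf_iff_prefix] at hpred'
        -- t and t' are both candidate prefixes of cs, so by prefix-freeness t = t'
        have hcomp : t <+: t' ∨ t' <+: t := List.prefix_or_prefix_of_prefix hpre hpred'.2
        have : t = t' := by
          rcases hcomp with hc | hc
          · exact candA_prefix_free _ hmem _ hmem' hc
          · exact (candA_prefix_free _ hmem' _ hmem hc).symm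
        rw [← this]; exact hok
      · rename_i hfind
        exfalso
        have := List.find?_eq_none.mp hfind t hmem
        simp only [Bool.and_eq_true, decide_eq_true_eq, List.isPrefixOf_iff_prefix] at this
        exact this ⟨hne, hpre⟩

-- the two per-word tests agree (strong induction on the word length)
theorem ql_okB (n : Nat) :
    ∀ cs l, cs.length ≤ n → ((qlA cs [] l).1 = [] ↔ okB cs l = true) := by
  induction n with
  | zero =>
    intro cs l hlen
    have : cs = [] := List.eq_nil_of_length_eq_zero (by omega)
    subst this
    simp [qlA, okB]
  | succ n ih =>
    intro cs l hlen
    rw [qlA_empty_iff, okB_iff]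
    constructor
    · rintro (⟨-, hc⟩ | ⟨k, hk1, hk2, hmem, hne, hcont⟩); · exact Or.inl hc
      refine Or.inr ⟨cs.take k, by simpa using hmem, by simpa using hne, List.take_prefix k cs, ?_⟩
      have hlt : (cs.take k).length = k := by simp; omega
      rw [hlt]
      have hdl : (cs.drop k).length ≤ n := by simp; omega
      have := (ih (cs.drop k) (cs.take k) hdl).mp (by simpa using hcont)
      exact this
    · rintro (hc | ⟨t, hmem, hne, hpre, hok⟩); · exact Or.inl ⟨rfl, hc⟩
      have hk1 : 1 ≤ t.length := candA_ne_nil t hmem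
      have hk2 : t.length ≤ cs.length := List.IsPrefix.length_le hpre
      have htake : cs.take t.length = t := (List.prefix_iff_eq_take.mp hpre).symm
      refine Or.inr ⟨t.length, hk1, hk2, ?_, ?_, ?_⟩
      · simpa [htake] using hmem
      · simpa [htake] using hne
      · have hdl : (cs.drop t.length).length ≤ n := by simp; omega
        have := (ih (cs.drop t.length) t hdl).mpr hok
        simpa [htake] using this

theorem wordA_eq_okB (w : String) : wordA w = okB w.toList [] := by
  have hsnd := snd_foldl_stepA w.toList [] [] []
  have hinv := inv_foldl_stepA w.toList [] [] []
  simp only [List.flatten_nil, List.nil_append] at hinv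
  have hiff : (w.toList.foldl stepA ([], [], [])).1.flatten = w.toList ↔
      (qlA w.toList [] []).1 = [] := by
    constructor
    · intro h
      rw [h] at hinv
      have hlen := congrArg List.length hinv
      simp only [List.length_append] at hlen
      have hz : (w.toList.foldl stepA ([], [], [])).2.1 = [] :=
        List.eq_nil_of_length_eq_zero (by omega)
      rw [← hsnd]; exact hz
    · intro h
      rw [← hsnd] at h
      rw [h, List.append_nil] at hinv
      exact hinv
  have hmain := (ql_okB w.toList.length w.toList [] (le_refl _))
  unfold wordA
  rcases hok : okB w.toList [] with _ | _
  · simp only [decide_eq_false_iff_not]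
    intro hc
    have := hmain.mp (hiff.mp hc)
    rw [hok] at this; exact absurd this (by simp)
  · simp only [decide_eq_true_eq]
    exact hiff.mpr (hmain.mpr hok)

theorem foldl_count_eq (bs : List String) :
    ∀ a : Int, bs.foldl (fun answer i => if wordA i then answer + 1 else answer) a
      = bs.foldl (fun a w => if okB w.toList [] then a + 1 else a) a := by
  intro a
  simp only [wordA_eq_okB]

-- ===== VERDICT (by name: the statement is the Claim_ definition above) =====
theorem solution_spec : Claim_equal_solution := by
  intro babbling _
  unfold Spec_solution solution solution_alt
  exact foldl_count_eq babbling 0
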